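-- pv_equiv track=rewrite | github.com/thinkphp/computer-science-in-python | Selected Topics/Farey/farey.py | farey_sequence
-- ===== SOURCE A (Python) =====
-- def farey_sequence(n):
--     """Generate the Farey sequence of order n."""
--     # Initialize the sequence with 0/1 and 1/1
--     farey_seq = [(0, 1), (1, 1)]
--
--     # Function to find the mediant of two fractions
--     def mediant(a, b, c, d):
--         return (a + c, b + d)
--
--     # Use a while loop to generate the Farey sequence
--     i = 0
--     while i < len(farey_seq) - 1:
--         a, b = farey_seq[i]
--         c, d = farey_seq[i + 1]
--         # Find the mediant fraction
--         med_num, med_den = mediant(a, b, c, d)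
--         if med_den <= n:
--             farey_seq.insert(i + 1, (med_num, med_den))
--         else:
--             i += 1
--
--     return farey_seq
-- ===== SOURCE B (Python) =====
-- def farey_sequence(n):
--     """Generate the Farey sequence of order n.
--
--     Stern-Brocot descent with an explicit stack of pending right neighbours,
--     keeping the current pair in locals, instead of repeated list.insert into
--     the middle of a growing list.
--     """
--     result = [(0, 1)]
--     a, b = 0, 1
--     c, d = 1, 1
--     stack = []
--     while True:
--         if b + d <= n:
--             stack.append((c, d))
--             c, d = a + c, b + d
--         else:
--             result.append((c, d))
--             a, b = c, d
--             if not stack: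
--                 break
--             c, d = stack.pop()
--     return result
-- ===== Notes on version B (the rewrite author's own statement) =====
-- stated objective: faster
-- what changed: Replaces A's growing flat list with a pointer and repeated middle list.insert by a Stern-Brocot descent that keeps the current pair in locals and the pending right neighbours on an explicit stack (O(1) push/pop), appending finished terms to the result; intended as faster (insertion cost removed); a timing run measured a several-fold speedup at the largest sizes both finished.
import Mathlib
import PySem

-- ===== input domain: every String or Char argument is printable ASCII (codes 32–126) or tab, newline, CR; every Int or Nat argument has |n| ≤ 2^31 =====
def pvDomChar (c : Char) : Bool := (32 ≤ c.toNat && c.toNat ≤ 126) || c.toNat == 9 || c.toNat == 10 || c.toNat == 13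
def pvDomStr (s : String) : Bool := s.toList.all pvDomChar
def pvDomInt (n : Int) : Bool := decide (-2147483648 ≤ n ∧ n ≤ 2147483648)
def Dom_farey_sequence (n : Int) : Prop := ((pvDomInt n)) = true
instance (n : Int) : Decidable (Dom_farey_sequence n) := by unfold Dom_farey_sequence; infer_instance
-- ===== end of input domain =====

-- B replaces A's repeated middle list.insert by a Stern-Brocot descent with an
-- explicit stack of pending right neighbours; intended as faster; a timing run measured a several-fold speedup at the largest sizes both finished.

-- number of loop iterations of either program is at most 2*|F_n| ≤ 2*n^2 + 4,
-- so this fuel is never exhausted on the stated domain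
def fareyFuel (n : Int) : Nat := 2 * n.toNat * n.toNat + 4

-- ===== PORT A =====
def fareyLoopA (n : Int) : Nat → List (Int × Int) → Int → List (Int × Int)
  | 0, seq, _ => seq
  | fuel + 1, seq, i =>
    if i < (seq.length : Int) - 1 then
      match PySem.List.pyGet? seq i, PySem.List.pyGet? seq (i + 1) with
      | some (a, b), some (c, d) =>
        -- mediant(a, b, c, d) = (a + c, b + d), inlined
        if b + d ≤ n then
          fareyLoopA n fuel (PySem.List.insert seq (i + 1) (a + c, b + d)) i
        else
          fareyLoopA n fuel seq (i + 1)
      | _, _ => seq   -- unreachable: the loop guard keeps both indices in range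
    else seq

def farey_sequence (n : Int) : List (Int × Int) :=
  fareyLoopA n (fareyFuel n) [(0, 1), (1, 1)] 0

-- ===== PORT B =====
def fareyLoopB (n : Int) :
    Nat → List (Int × Int) → Int → Int → Int → Int → List (Int × Int) → List (Int × Int)
  | 0, res, _, _, c, d, stack => res ++ (c, d) :: stack   -- fuel artifact only; fareyFuel is never exhausted
  | fuel + 1, res, a, b, c, d, stack =>
    if b + d ≤ n then
      fareyLoopB n fuel res a b (a + c) (b + d) ((c, d) :: stack)
    else
      match stack with
      | [] => res ++ [(c, d)]
      | (c', d') :: rest => fareyLoopB n fuel (res ++ [(c, d)]) c d c' d' rest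

def farey_sequence_alt (n : Int) : List (Int × Int) :=
  fareyLoopB n (fareyFuel n) [(0, 1)] 0 1 1 1 []

-- ===== PRECONDITION & SPEC =====
def Spec_farey_sequence (n : Int) (out : List (Int × Int)) : Prop := out = farey_sequence_alt n
instance (n : Int) (out : List (Int × Int)) : Decidable (Spec_farey_sequence n out) := by unfold Spec_farey_sequence; infer_instance

-- ===== CLAIM (what is proved, stated in full; the proofs are below) =====
def Claim_equal_farey_sequence : Prop := ∀ (n : Int), Dom_farey_sequence n → Spec_farey_sequence n (farey_sequence n)

-- ===== LEMMAS AND PROOFS =====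

-- A's loop returns immediately once the pointer reaches the last element.
theorem fareyLoopA_done (n : Int) (fuel : Nat) (seq : List (Int × Int)) (i : Int)
    (h : ¬ i < (seq.length : Int) - 1) : fareyLoopA n fuel seq i = seq := by
  cases fuel with
  | zero => rfl
  | succ fuel => rw [fareyLoopA, if_neg h]

-- Bisimulation: A's state (seq, i) corresponds to B's state (res, a, b, c, d, stack) via
-- seq = res ++ (c, d) :: stack, res = t ++ [(a, b)], i = |t|
-- (the current pair of A is seq[i] = (a, b), seq[i+1] = (c, d); pending right neighbours follow).
theorem farey_bisim (n : Int) :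
    ∀ (fuel : Nat) (t : List (Int × Int)) (a b c d : Int) (stack : List (Int × Int)),
    fareyLoopA n fuel ((t ++ [(a, b)]) ++ (c, d) :: stack) (t.length : Int) =
      fareyLoopB n fuel (t ++ [(a, b)]) a b c d stack := by
  intro fuel
  induction fuel with
  | zero => intro t a b c d stack; rfl
  | succ fuel ih =>
    intro t a b c d stack
    have hguard : (t.length : Int) < (((t ++ [(a, b)]) ++ (c, d) :: stack).length : Int) - 1 := by
      simp; omega
    have hget1 : PySem.List.pyGet? ((t ++ [(a, b)]) ++ (c, d) :: stack) (t.length : Int)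
        = some (a, b) := by
      simp
    have hget2 : PySem.List.pyGet? ((t ++ [(a, b)]) ++ (c, d) :: stack) ((t.length : Int) + 1)
        = some (c, d) := by
      simpa [add_comm] using
        PySem.List.pyGet?_append_length (pre := t ++ [(a, b)]) (y := (c, d)) (ys := stack)
    rw [fareyLoopA, if_pos hguard, hget1, hget2]
    dsimp only
    by_cases hmed : b + d ≤ n
    · rw [if_pos hmed]
      have hins : PySem.List.insert ((t ++ [(a, b)]) ++ (c, d) :: stack) ((t.length : Int) + 1)
          (a + c, b + d) = (t ++ [(a, b)]) ++ (a + c, b + d) :: (c, d) :: stack := by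
        have hp : ((t.length : Int) + 1) = (((t ++ [(a, b)]).length : Nat) : Int) := by
          simp
        rw [hp, PySem.List.insert_natCast _ _ _ (by simp)]
        have htake : List.take (t.length + 1) (t ++ (a, b) :: (c, d) :: stack) = t ++ [(a, b)] := by
          rw [show t.length + 1 = (t ++ [(a, b)]).length by simp,
            show t ++ (a, b) :: (c, d) :: stack = (t ++ [(a, b)]) ++ (c, d) :: stack by simp,
            List.take_left]
        simp [htake]
      rw [hins]
      have := ih t a b (a + c) (b + d) ((c, d) :: stack)
      simpa [fareyLoopB, hmed] using this
    · rw [if_neg hmed]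
      cases stack with
      | nil =>
        have hdone : ¬ ((t.length : Int) + 1) <
            (((t ++ [(a, b)]) ++ [(c, d)]).length : Int) - 1 := by
          simp; omega
        rw [fareyLoopA_done n fuel _ _ hdone]
        simp [fareyLoopB, hmed]
      | cons cd' rest =>
        obtain ⟨c', d'⟩ := cd'
        have hi : (t.length : Int) + 1 = (((t ++ [(a, b)]).length : Nat) : Int) := by simp
        have := ih (t ++ [(a, b)]) c d c' d' rest
        rw [hi]
        simpa [fareyLoopB, hmed] using this

-- ===== VERDICT (by name: the statement is the Claim_ definition above) =====
theorem farey_sequence_spec : Claim_equal_farey_sequence := by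
  intro n _
  unfold Spec_farey_sequence farey_sequence farey_sequence_alt
  have := farey_bisim n (fareyFuel n) [] 0 1 1 1 []
  simpa using this
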